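-- pv_equiv track=rewrite | github.com/thijsi123/Remove_asterisks | updated-python-tavern-card-tools.py | remove_paired_asterisks
-- ===== SOURCE A (Python) =====
-- def remove_paired_asterisks(input_str: str) -> str:
--     if input_str is None:
--         return input_str
--
--     input_chars = list(input_str)
--     AST = '*'
--     BRK = '\n'
--     pos_to_elim = []
--     detecting_pair = False
--     pair_start_index = 0
--
--     for i, ch in enumerate(input_chars):
--         if ch == AST:
--             if i + 1 < len(input_chars) and input_chars[i + 1] == AST:
--                 continue
--             if i > 0 and input_chars[i - 1] == AST:
--                 continue
--
--             if not detecting_pair: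
--                 detecting_pair = True
--                 pair_start_index = i
--             else:
--                 pos_to_elim.append(pair_start_index)
--                 pos_to_elim.append(i)
--                 detecting_pair = False
--
--         if ch == BRK:
--             detecting_pair = False
--
--     result = ''.join(ch for i, ch in enumerate(input_chars) if i not in pos_to_elim)
--     return result
-- ===== SOURCE B (Python) =====
-- def remove_paired_asterisks(input_str: str) -> str:
--     if input_str is None:
--         return input_str
--     n = len(input_str)
--     out = []
--     pending = None  # index in out of the currently open unmatched single '*'
--     for i, ch in enumerate(input_str):
--         if ch == '*' and not (i + 1 < n and input_str[i + 1] == '*') \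
--                 and not (i > 0 and input_str[i - 1] == '*'):
--             if pending is None:
--                 pending = len(out)
--                 out.append(ch)
--             else:
--                 del out[pending]
--                 pending = None
--         else:
--             if ch == '\n':
--                 pending = None
--             out.append(ch)
--     return ''.join(out)
-- ===== Notes on version B (the rewrite author's own statement) =====
-- stated objective: faster
-- what changed: B builds the output in one pass with a buffer and a single pending index of the open unmatched '*' (deleting it when the pair closes, forgetting it at a newline), instead of A's collecting a list of positions to eliminate and then filtering every index through an O(m) list-membership test.
import Mathlib
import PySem

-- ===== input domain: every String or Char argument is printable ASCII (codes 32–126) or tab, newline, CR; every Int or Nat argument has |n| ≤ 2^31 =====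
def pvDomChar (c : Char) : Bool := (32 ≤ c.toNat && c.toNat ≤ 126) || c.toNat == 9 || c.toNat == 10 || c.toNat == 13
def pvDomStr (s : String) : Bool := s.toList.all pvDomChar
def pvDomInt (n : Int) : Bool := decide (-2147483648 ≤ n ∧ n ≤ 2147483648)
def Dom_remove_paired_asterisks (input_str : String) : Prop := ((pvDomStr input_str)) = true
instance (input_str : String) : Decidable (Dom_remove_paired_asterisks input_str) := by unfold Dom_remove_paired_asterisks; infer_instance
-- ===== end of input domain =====

-- B replaces A's eliminated-position list (and its list-membership test per output char) by a single
-- output buffer with one pending index of the open unmatched '*': one pass, no final filter pass.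

-- ===== PORT A =====
-- loop body of A's for-loop; state = (pos_to_elim, detecting_pair, pair_start_index)
def pvStepA (l : List Char) (s : List Int × Bool × Int) (p : Int × Char) : List Int × Bool × Int :=
  let elim := s.1; let det := s.2.1; let ps := s.2.2
  let i := p.1; let ch := p.2
  -- first 'continue': next char is also '*'
  if ch = '*' ∧ (i + 1 < PySem.List.len l ∧ PySem.List.pyGetD l (i + 1) ' ' = '*') then s
  -- second 'continue': previous char is also '*'
  else if ch = '*' ∧ (0 < i ∧ PySem.List.pyGetD l (i - 1) ' ' = '*') then s
  else
    let s1 := if ch = '*' then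
                (if det = false then (elim, true, i) else (elim ++ [ps, i], false, ps))
              else (elim, det, ps)
    if ch = '\n' then (s1.1, false, s1.2.2) else s1

def remove_paired_asterisks (input_str : String) : String :=
  let input_chars := input_str.toList
  let fin := (PySem.List.enumerate input_chars 0).foldl (pvStepA input_chars) ([], false, 0)
  -- ''.join(ch for i, ch in enumerate(input_chars) if i not in pos_to_elim)
  String.mk (((PySem.List.enumerate input_chars 0).filter
      (fun p => !(fin.1.contains p.1))).map Prod.snd)

-- ===== PORT B =====
-- loop body of B's for-loop; state = (out, pending)
def pvStepB (l : List Char) (s : List Char × Option Nat) (p : Int × Char) : List Char × Option Nat :=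
  let out := s.1; let pending := s.2
  let i := p.1; let ch := p.2
  if ch = '*' ∧ ¬ (i + 1 < PySem.List.len l ∧ PySem.List.pyGetD l (i + 1) ' ' = '*')
             ∧ ¬ (0 < i ∧ PySem.List.pyGetD l (i - 1) ' ' = '*') then
    match pending with
    | none => (out ++ [ch], some out.length)
    | some q => (out.eraseIdx q, none)     -- del out[pending]
  else
    (out ++ [ch], if ch = '\n' then none else pending)

def remove_paired_asterisks_alt (input_str : String) : String :=
  let l := input_str.toList
  let fin := (PySem.List.enumerate l 0).foldl (pvStepB l) ([], none)
  String.mk fin.1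

-- ===== PRECONDITION & SPEC =====
def Spec_remove_paired_asterisks (input_str : String) (out : String) : Prop := out = remove_paired_asterisks_alt input_str
instance (input_str : String) (out : String) : Decidable (Spec_remove_paired_asterisks input_str out) := by unfold Spec_remove_paired_asterisks; infer_instance

-- ===== CLAIM (what is proved, stated in full; the proofs are below) =====
def Claim_equal_remove_paired_asterisks : Prop := ∀ (input_str : String), Dom_remove_paired_asterisks input_str → Spec_remove_paired_asterisks input_str (remove_paired_asterisks input_str)

-- ===== LEMMAS AND PROOFS =====

-- chars kept by A's final filter on an enumerated segment
def pvKeep (e : List (Int × Char)) (elim : List Int) : List Char :=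
  (e.filter (fun p => !(elim.contains p.1))).map Prod.snd

-- output produced from the first k characters
def pvF (l : List Char) (k : Nat) (elim : List Int) : List Char :=
  pvKeep (PySem.List.enumerate (l.take k) 0) elim

-- simulation invariant between A's state and B's state after consuming the first k characters
def pvInv (l : List Char) (k : Nat) (sA : List Int × Bool × Int) (sB : List Char × Option Nat) : Prop :=
  sB.1 = pvF l k sA.1 ∧
  (if sA.2.1 then
      ∃ st : Nat, sA.2.2 = (st : Int) ∧ st < k ∧ (∀ j ∈ sA.1, j < (st : Int)) ∧
        sB.2 = some (pvF l st sA.1).length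
   else sB.2 = none ∧ (∀ j ∈ sA.1, j < (k : Int)))

lemma pvKeep_append (e₁ e₂ : List (Int × Char)) (elim : List Int) :
    pvKeep (e₁ ++ e₂) elim = pvKeep e₁ elim ++ pvKeep e₂ elim := by
  simp [pvKeep]

lemma pvKeep_congr (e : List (Int × Char)) (elim elim' : List Int)
    (h : ∀ p ∈ e, (p.1 ∈ elim ↔ p.1 ∈ elim')) :
    pvKeep e elim = pvKeep e elim' := by
  unfold pvKeep
  congr 1
  apply List.filter_congr
  intro p hp
  simp [h p hp]

lemma pvKeep_of_none (e : List (Int × Char)) (elim : List Int)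
    (h : ∀ p ∈ e, p.1 ∉ elim) :
    pvKeep e elim = e.map Prod.snd := by
  unfold pvKeep
  rw [List.filter_eq_self.mpr]
  intro p hp
  simp [h p hp]

lemma pv_mem_enumerate_bounds {xs : List Char} {s : Int} {p : Int × Char}
    (hp : p ∈ PySem.List.enumerate xs s) : s ≤ p.1 ∧ p.1 < s + xs.length := by
  rcases (PySem.List.mem_enumerate_iff xs s p).1 hp with ⟨k, hk, rfl⟩
  constructor <;> simp <;> omega

-- pvF after one more kept character
lemma pvF_succ (l : List Char) (k : Nat) (elim : List Int) (hk : k < l.length)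
    (hfree : ∀ j ∈ elim, j ≠ (k : Int)) :
    pvF l (k + 1) elim = pvF l k elim ++ [l[k]] := by
  unfold pvF
  rw [List.take_succ, List.getElem?_eq_getElem hk]
  simp only [Option.toList_some]
  rw [PySem.List.enumerate_append, pvKeep_append]
  have hlen : (l.take k).length = k := List.length_take_of_le (le_of_lt hk)
  have hnotin : ((k : Nat) : Int) ∉ elim := fun h => (hfree _ h rfl)
  congr 1
  simp [pvKeep, PySem.List.enumerate_cons, PySem.List.enumerate_nil, hlen, hnotin]

-- pvF after one more eliminated character
lemma pvF_succ_elim (l : List Char) (k : Nat) (elim : List Int) (hk : k < l.length)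
    (hmem : (k : Int) ∈ elim) :
    pvF l (k + 1) elim = pvF l k elim := by
  unfold pvF
  rw [List.take_succ, List.getElem?_eq_getElem hk]
  simp only [Option.toList_some]
  rw [PySem.List.enumerate_append, pvKeep_append]
  have hlen : (l.take k).length = k := List.length_take_of_le (le_of_lt hk)
  simp [pvKeep, PySem.List.enumerate_cons, PySem.List.enumerate_nil, hlen, hmem]

-- splitting pvF at a position st above every eliminated index: everything from st on is kept
lemma pvF_split (l : List Char) (st k : Nat) (elim : List Int)
    (hb : ∀ j ∈ elim, j < (st : Int)) (hsk : st ≤ k) (hk : k ≤ l.length) :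
    pvF l k elim = pvF l st elim ++ ((l.take k).drop st) := by
  obtain ⟨seg, hseg⟩ : ∃ seg, (l.take k).drop st = seg := ⟨_, rfl⟩
  rw [hseg]
  have h0 : (l.take k).take st = l.take st := by
    rw [List.take_take]; congr 1; omega
  have h1 : l.take k = l.take st ++ seg := by
    rw [← hseg, ← h0]; exact (List.take_append_drop _ _).symm
  have hst : (l.take st).length = st := List.length_take_of_le (le_trans hsk hk)
  unfold pvF
  rw [h1, PySem.List.enumerate_append, pvKeep_append]
  congr 1
  rw [pvKeep_of_none]
  · simp
  · intro p hp hmem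
    have hbd := pv_mem_enumerate_bounds hp
    have := hb _ hmem
    simp [hst] at hbd
    omega

-- closing a pair at position k opened at position st: erase the pending char from the buffer
lemma pvF_close (l : List Char) (st k : Nat) (elim : List Int)
    (hb : ∀ j ∈ elim, j < (st : Int)) (hsk : st < k) (hk : k < l.length) :
    pvF l (k + 1) (elim ++ [(st : Int), (k : Int)])
      = (pvF l k elim).eraseIdx (pvF l st elim).length := by
  obtain ⟨seg', hseg'⟩ : ∃ s', (l.take k).drop (st + 1) = s' := ⟨_, rfl⟩
  have hlenk : (l.take k).length = k := List.length_take_of_le hk.le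
  have hlenseg : seg'.length = k - (st + 1) := by
    rw [← hseg', List.length_drop, hlenk]
  have hsegcons : (l.take k).drop st = l[st] :: seg' := by
    rw [List.drop_eq_getElem_cons (by omega : st < (l.take k).length), hseg']
    congr 1
    exact List.getElem_take
  -- right-hand side: erasing the pending character
  have hsplitA : pvF l k elim = pvF l st elim ++ (l[st] :: seg') := by
    rw [pvF_split l st k elim hb hsk.le hk.le, hsegcons]
  have hRHS : (pvF l k elim).eraseIdx (pvF l st elim).length = pvF l st elim ++ seg' := by
    rw [hsplitA, List.eraseIdx_append_of_length_le (le_refl _), Nat.sub_self,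
      List.eraseIdx_cons_zero]
  -- left-hand side
  have hmem : ((k : Nat) : Int) ∈ elim ++ [(st : Int), (k : Int)] := by simp
  have hL1 : pvF l (k + 1) (elim ++ [(st : Int), (k : Int)]) = pvF l k (elim ++ [(st : Int), (k : Int)]) :=
    pvF_succ_elim l k _ hk hmem
  have h0 : (l.take k).take st = l.take st := by rw [List.take_take]; congr 1; omega
  have h1 : l.take k = l.take st ++ (l[st] :: seg') := by
    rw [← hsegcons, ← h0]; exact (List.take_append_drop _ _).symm
  have hst : (l.take st).length = st := List.length_take_of_le (by omega)
  have hL2 : pvF l k (elim ++ [(st : Int), (k : Int)])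
      = pvKeep (PySem.List.enumerate (l.take st) 0) (elim ++ [(st : Int), (k : Int)])
        ++ pvKeep (PySem.List.enumerate (l[st] :: seg') ((st : Int))) (elim ++ [(st : Int), (k : Int)]) := by
    unfold pvF
    rw [h1, PySem.List.enumerate_append, pvKeep_append, hst]
    norm_num
  have hpart1 : pvKeep (PySem.List.enumerate (l.take st) 0) (elim ++ [(st : Int), (k : Int)])
      = pvF l st elim := by
    unfold pvF
    apply pvKeep_congr
    intro p hp
    have hbd := pv_mem_enumerate_bounds hp
    rw [hst] at hbd
    simp only [List.mem_append, List.mem_cons, List.not_mem_nil, or_false]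
    constructor
    · rintro (hm | hm | hm)
      · exact hm
      · omega
      · omega
    · exact fun hm => Or.inl hm
  have hpart2 : pvKeep (PySem.List.enumerate (l[st] :: seg') ((st : Int))) (elim ++ [(st : Int), (k : Int)])
      = seg' := by
    rw [PySem.List.enumerate_cons]
    have hdrop : pvKeep [((st : Int), l[st])] (elim ++ [(st : Int), (k : Int)]) = [] := by
      simp [pvKeep]
    have : pvKeep ((( (st : Int)), l[st]) :: PySem.List.enumerate seg' ((st : Int) + 1))
        (elim ++ [(st : Int), (k : Int)])
        = pvKeep [((st : Int), l[st])] (elim ++ [(st : Int), (k : Int)])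
          ++ pvKeep (PySem.List.enumerate seg' ((st : Int) + 1)) (elim ++ [(st : Int), (k : Int)]) := by
      rw [← pvKeep_append]; rfl
    rw [this, hdrop, List.nil_append]
    rw [pvKeep_of_none]
    · exact PySem.List.map_snd_enumerate seg' _
    · intro p hp hm
      have hbd := pv_mem_enumerate_bounds hp
      rw [hlenseg] at hbd
      simp only [List.mem_append, List.mem_cons, List.not_mem_nil, or_false] at hm
      rcases hm with hm | hm | hm
      · have := hb _ hm; omega
      · omega
      · omega
  rw [hL1, hL2, hpart1, hpart2, hRHS]

-- the four ways a step can preserve the invariant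
lemma pvInv_copy (l : List Char) (k : Nat) (elim : List Int) (det : Bool) (ps : Int)
    (out : List Char) (pending : Option Nat) (hk : k < l.length)
    (h : pvInv l k (elim, det, ps) (out, pending)) :
    pvInv l (k + 1) (elim, det, ps) (out ++ [l[k]], pending) := by
  unfold pvInv at h ⊢
  obtain ⟨h1, h2⟩ := h
  have h1' : out = pvF l k elim := h1
  cases det with
  | false =>
    simp only [Bool.false_eq_true, if_false] at h2 ⊢
    obtain ⟨hp, hb⟩ := h2
    have hfree : ∀ j ∈ elim, j ≠ (k : Int) := fun j hj => by have := hb j hj; omega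
    exact ⟨by rw [pvF_succ l k elim hk hfree, ← h1'], hp,
           fun j hj => by have := hb j hj; omega⟩
  | true =>
    simp only [if_true] at h2 ⊢
    obtain ⟨st, hps, hstk, hb, hp⟩ := h2
    have hfree : ∀ j ∈ elim, j ≠ (k : Int) := fun j hj => by have := hb j hj; omega
    exact ⟨by rw [pvF_succ l k elim hk hfree, ← h1'],
           st, hps, by omega, hb, hp⟩

lemma pvInv_brk (l : List Char) (k : Nat) (elim : List Int) (det : Bool) (ps : Int)
    (out : List Char) (pending : Option Nat) (hk : k < l.length)
    (h : pvInv l k (elim, det, ps) (out, pending)) :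
    pvInv l (k + 1) (elim, false, ps) (out ++ [l[k]], none) := by
  unfold pvInv at h ⊢
  obtain ⟨h1, h2⟩ := h
  have h1' : out = pvF l k elim := h1
  have hb : ∀ j ∈ elim, j < ((k : Nat) : Int) := by
    cases det with
    | false =>
      simp only [Bool.false_eq_true, if_false] at h2
      exact h2.2
    | true =>
      simp only [if_true] at h2
      obtain ⟨st, _, hstk, hbb, _⟩ := h2
      exact fun j hj => by have := hbb j hj; omega
  have hfree : ∀ j ∈ elim, j ≠ (k : Int) := fun j hj => by have := hb j hj; omega
  exact ⟨by rw [pvF_succ l k elim hk hfree, ← h1'], by simp,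
         fun j hj => by have := hb j hj; omega⟩

lemma pvInv_open (l : List Char) (k : Nat) (elim : List Int) (ps : Int)
    (out : List Char) (hk : k < l.length)
    (h : pvInv l k (elim, false, ps) (out, none)) :
    pvInv l (k + 1) (elim, true, (k : Int)) (out ++ [l[k]], some out.length) := by
  unfold pvInv at h ⊢
  obtain ⟨h1, h2⟩ := h
  have h1' : out = pvF l k elim := h1
  simp only [Bool.false_eq_true, if_false] at h2
  obtain ⟨-, hb⟩ := h2
  have hfree : ∀ j ∈ elim, j ≠ (k : Int) := fun j hj => by have := hb j hj; omega
  refine ⟨by rw [pvF_succ l k elim hk hfree, ← h1'], ?_⟩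
  simp only [if_true]
  exact ⟨k, rfl, by omega, hb, by rw [h1']⟩

lemma pvInv_close (l : List Char) (k : Nat) (elim : List Int) (ps : Int)
    (out : List Char) (q : Nat) (hk : k < l.length)
    (h : pvInv l k (elim, true, ps) (out, some q)) :
    pvInv l (k + 1) (elim ++ [ps, (k : Int)], false, ps) (out.eraseIdx q, none) := by
  unfold pvInv at h ⊢
  obtain ⟨h1, h2⟩ := h
  simp only [if_true] at h2
  obtain ⟨st, hps, hstk, hb, hq⟩ := h2
  have h1' : out = pvF l k elim := h1
  have hq2 : some q = some (pvF l st elim).length := hq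
  have hq' : q = (pvF l st elim).length := by injection hq2
  subst hps
  refine ⟨?_, by simp, ?_⟩
  · rw [pvF_close l st k elim hb hstk hk, ← h1', ← hq']
  · intro j hj
    rcases List.mem_append.1 hj with hj | hj
    · have := hb j hj; omega
    · simp only [List.mem_cons, List.not_mem_nil, or_false] at hj
      rcases hj with hj | hj <;> omega

-- one loop step of A and of B preserve the invariant
lemma pvStep_inv (l : List Char) (k : Nat) (c : Char) (hk : k < l.length) (hc : l[k] = c)
    (sA : List Int × Bool × Int) (sB : List Char × Option Nat)
    (h : pvInv l k sA sB) :
    pvInv l (k + 1) (pvStepA l sA ((k : Int), c)) (pvStepB l sB ((k : Int), c)) := by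
  obtain ⟨elim, det, ps⟩ := sA
  obtain ⟨out, pending⟩ := sB
  subst hc
  by_cases hstar : l[k] = '*'
  · by_cases h1 : ((k : Int) + 1 < PySem.List.len l ∧ PySem.List.pyGetD l ((k : Int) + 1) ' ' = '*')
    · -- first 'continue' in A / guard false in B: plain copy
      have hbrk : ¬ l[k] = '\n' := by rw [hstar]; decide
      simp only [pvStepA, pvStepB, hstar, h1, hbrk, not_true_eq_false, and_false, false_and,
        and_true, true_and, if_true, if_false, ite_false, ite_true, not_false_eq_true]
      have := pvInv_copy l k elim det ps out pending hk h
      simpa [hstar] using this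
    · by_cases h2 : (0 < (k : Int) ∧ PySem.List.pyGetD l ((k : Int) - 1) ' ' = '*')
      · -- second 'continue' in A / guard false in B: plain copy
        have hbrk : ¬ l[k] = '\n' := by rw [hstar]; decide
        simp only [pvStepA, pvStepB, hstar, h1, h2, hbrk, not_true_eq_false, and_false, false_and,
          and_true, true_and, if_true, if_false, ite_false, ite_true, not_false_eq_true]
        have := pvInv_copy l k elim det ps out pending hk h
        simpa [hstar] using this
      · -- isolated '*': open or close
        have hbrk : ¬ l[k] = '\n' := by rw [hstar]; decide
        simp only [pvStepA, pvStepB, hstar, h1, h2, hbrk, not_true_eq_false, and_false, false_and,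
          and_true, true_and, if_true, if_false, ite_false, ite_true, not_false_eq_true]
        cases det with
        | false =>
          have hp : pending = none := by
            have h2' := h.2
            simp only [pvInv, Bool.false_eq_true, if_false] at h2'
            exact h2'.1
          subst hp
          simp only [Bool.false_eq_true, not_false_eq_true, if_true, ite_true, if_false]
          have := pvInv_open l k elim ps out hk h
          simpa [hstar] using this
        | true =>
          have h2' := h.2
          simp only [pvInv, if_true] at h2'
          obtain ⟨st, hps, hstk, hb, hq⟩ := h2'
          have hq' : pending = some (pvF l st elim).length := hq
          subst hq'
          simp only [decide_true, not_true_eq_false, if_false, ite_false]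
          exact pvInv_close l k elim ps out _ hk h
  · -- not a '*'
    by_cases hbrk : l[k] = '\n'
    · simp only [pvStepA, pvStepB, hstar, hbrk, false_and, and_false, not_false_eq_true,
        if_true, if_false, ite_true, ite_false]
      have := pvInv_brk l k elim det ps out pending hk h
      simpa [hbrk] using this
    · simp only [pvStepA, pvStepB, hstar, hbrk, false_and, and_false, not_false_eq_true,
        if_true, if_false, ite_true, ite_false]
      have := pvInv_copy l k elim det ps out pending hk h
      simpa [hbrk] using this

-- the main simulation: running both loops over the suffix from position k
lemma pv_loop (l : List Char) (xs : List Char) :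
    ∀ (k : Nat) (sA : List Int × Bool × Int) (sB : List Char × Option Nat),
      xs = l.drop k → pvInv l k sA sB →
      pvKeep (PySem.List.enumerate l 0)
          (((PySem.List.enumerate xs (k : Int)).foldl (pvStepA l) sA).1)
        = ((PySem.List.enumerate xs (k : Int)).foldl (pvStepB l) sB).1 := by
  induction xs with
  | nil =>
    intro k sA sB hxs hInv
    have hk : l.length ≤ k := by
      have := hxs.symm
      rwa [List.drop_eq_nil_iff] at this
    simp only [PySem.List.enumerate_nil, List.foldl_nil]
    have h1 := hInv.1
    rw [h1]
    unfold pvF pvKeep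
    rw [List.take_of_length_le hk]
  | cons c xs' ih =>
    intro k sA sB hxs hInv
    have hk : k < l.length := by
      by_contra hcon
      rw [List.drop_eq_nil_iff.mpr (by omega)] at hxs
      exact (List.cons_ne_nil _ _) hxs
    have hget : l[k] = c ∧ l.drop (k + 1) = xs' := by
      rw [List.drop_eq_getElem_cons hk] at hxs
      exact ⟨(List.cons.inj hxs.symm).1, ((List.cons.inj hxs.symm).2)⟩
    rw [PySem.List.enumerate_cons]
    simp only [List.foldl_cons]
    have hcast : (k : Int) + 1 = ((k + 1 : Nat) : Int) := by push_cast; ring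
    rw [hcast]
    exact ih (k + 1) _ _ hget.2.symm (pvStep_inv l k c hk hget.1 sA sB hInv)

-- ===== VERDICT (by name: the statement is the Claim_ definition above) =====
theorem remove_paired_asterisks_spec : Claim_equal_remove_paired_asterisks := by
  intro s _
  unfold Spec_remove_paired_asterisks remove_paired_asterisks remove_paired_asterisks_alt
  have h0 : pvInv s.toList 0 ([], false, (0 : Int)) ([], none) := by
    constructor
    · simp [pvF, pvKeep, PySem.List.enumerate_nil]
    · simp
  have := pv_loop s.toList s.toList 0 ([], false, (0 : Int)) ([], none) (by simp) h0
  simp only [Nat.cast_zero] at this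
  simp only []
  rw [← this]
  rfl
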